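-- pv_equiv track=rewrite | github.com/rpparas/LeetCode-Programming-Problems | Sorting/SortAnagrams.py | get_anagram_signature
-- ===== SOURCE A (Python) =====
-- import collections
--
-- def get_anagram_signature(word):
--     # ignore/remove all spaces and extra chars
--     # sort letters in word using OrderedDictionary
--
--     d = collections.OrderedDict()
--     for w in word:
--         if w.isalpha():
--             w = w.lower()
--             if w in d:
--                 d[w] = d[w] + 1
--             else:
--                 d[w] = 1
--
--     # assume sorting letters is done via QuickSort, otherwise, write our own function?
--     d = collections.OrderedDict(sorted(d.items()))
--     output = ""
--     for i, k in d.items():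
--         output += i * k
--     return output
-- ===== SOURCE B (Python) =====
-- def get_anagram_signature(word):
--     return ''.join(sorted(c.lower() for c in word if c.isalpha()))
-- ===== Notes on version B (the rewrite author's own statement) =====
-- stated objective: idiomatic
-- what changed: B drops the frequency OrderedDict entirely: it collects the lowered alphabetic characters into one flat list, sorts that whole list with the built-in sort and joins it, instead of counting occurrences into a dict, sorting the distinct keys and expanding each key by its count.
import Mathlib
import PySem

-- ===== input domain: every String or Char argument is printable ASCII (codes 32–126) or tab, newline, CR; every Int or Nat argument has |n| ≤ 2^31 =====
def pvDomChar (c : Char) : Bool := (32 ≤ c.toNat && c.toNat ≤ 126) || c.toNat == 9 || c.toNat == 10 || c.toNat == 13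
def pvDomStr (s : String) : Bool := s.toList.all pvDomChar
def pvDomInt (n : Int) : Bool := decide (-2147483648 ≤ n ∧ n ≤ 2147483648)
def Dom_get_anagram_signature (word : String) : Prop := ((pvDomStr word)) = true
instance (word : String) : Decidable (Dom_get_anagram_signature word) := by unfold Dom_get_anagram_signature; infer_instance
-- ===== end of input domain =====

-- B (idiomatic): sorts the flat list of lowered alphabetic characters and joins it, instead of
-- counting into an ordered dict and expanding the sorted distinct keys by their counts.

-- ===== PORT A =====
-- body of A's counting loop: 'if w.isalpha(): w = w.lower(); d[w] = d[w]+1 if w in d else 1'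
def aStep (d : PySem.Dict Char Int) (w : Char) : PySem.Dict Char Int :=
  if PySem.Chars.isalpha w then
    let w := PySem.Chars.lowerChar w
    if d.contains w then d.insert w (d.getD w 0 + 1) else d.insert w 1
  else d

def get_anagram_signature (word : String) : String :=
  let d : PySem.Dict Char Int := word.toList.foldl aStep PySem.Dict.empty
  -- d = OrderedDict(sorted(d.items())): the (key, value) pairs are sorted as tuples
  let items := PySem.List.sorted2 d.items (fun p => p.1) (fun p => p.2) false
  -- output += i * k, the output string kept as List Char and returned via String.ofList
  let output : List Char := items.foldl (fun out p => out ++ PySem.List.pyRepeat [p.1] p.2) []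
  String.ofList output

-- ===== PORT B =====
def get_anagram_signature_alt (word : String) : String :=
  String.ofList (PySem.List.sorted
    ((word.toList.filter PySem.Chars.isalpha).map PySem.Chars.lowerChar) (fun c => c) false)

-- ===== PRECONDITION & SPEC =====
def Spec_get_anagram_signature (word : String) (out : String) : Prop := out = get_anagram_signature_alt word
instance (word : String) (out : String) : Decidable (Spec_get_anagram_signature word out) := by unfold Spec_get_anagram_signature; infer_instance

-- ===== CLAIM (what is proved, stated in full; the proofs are below) =====
def Claim_equal_get_anagram_signature : Prop := ∀ (word : String), Dom_get_anagram_signature word → Spec_get_anagram_signature word (get_anagram_signature word)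

-- ===== LEMMAS AND PROOFS =====

-- insertBy with two comparators that agree between the inserted element and the list elements
theorem insertBy_congr_pv {α : Type} (f g : α → α → Bool) (x : α) (acc : List α)
    (h : ∀ a ∈ acc, f x a = g x a) :
    PySem.List.insertBy f x acc = PySem.List.insertBy g x acc := by
  induction acc with
  | nil => rfl
  | cons y ys ih =>
    simp only [PySem.List.insertBy]
    rw [h y (by simp)]
    by_cases hg : g x y = true
    · simp [hg]
    · simp only [Bool.not_eq_true] at hg
      simp [hg]
      exact ih (fun a ha => h a (by simp [ha]))

theorem foldl_insertBy_congr_aux_pv {α : Type} (f g : α → α → Bool) (U : List α)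
    (h : ∀ a ∈ U, ∀ b ∈ U, f a b = g a b) :
    ∀ (xs : List α), (∀ a ∈ xs, a ∈ U) → ∀ (acc : List α), (∀ a ∈ acc, a ∈ U) →
    xs.foldl (fun acc x => PySem.List.insertBy f x acc) acc
      = xs.foldl (fun acc x => PySem.List.insertBy g x acc) acc := by
  intro xs
  induction xs with
  | nil => intro _ acc _; rfl
  | cons x t ih =>
    intro hxs acc hacc
    simp only [List.foldl_cons]
    rw [insertBy_congr_pv f g x acc (fun a ha => h x (hxs x (by simp)) a (hacc a ha))]
    exact ih (fun a ha => hxs a (by simp [ha]))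
      _ (fun a ha => by
        rcases (PySem.List.mem_insertBy g x a acc).mp ha with rfl | ha'
        · exact hxs a (by simp)
        · exact hacc a ha')

-- a sort only ever compares elements of its input list: agreeing comparators sort alike
theorem foldl_insertBy_congr_pv {α : Type} (f g : α → α → Bool) (xs : List α)
    (h : ∀ a ∈ xs, ∀ b ∈ xs, f a b = g a b) :
    xs.foldl (fun acc x => PySem.List.insertBy f x acc) []
      = xs.foldl (fun acc x => PySem.List.insertBy g x acc) [] :=
  foldl_insertBy_congr_aux_pv f g xs h xs (fun _ ha => ha) [] (by simp)

-- sorting pairs lexicographically = sorting by the first component, when the second is a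
-- function of the first on the list's members
theorem sorted2_eq_sorted_fst_pv {α κ₁ κ₂ : Type} [LinearOrder κ₁] [LinearOrder κ₂]
    (xs : List α) (k1 : α → κ₁) (k2 : α → κ₂)
    (h : ∀ a ∈ xs, ∀ b ∈ xs, k1 a = k1 b → k2 a = k2 b) :
    PySem.List.sorted2 xs k1 k2 false = PySem.List.sorted xs k1 false := by
  unfold PySem.List.sorted2 PySem.List.sorted
  simp only [Bool.false_eq_true, if_false]
  apply foldl_insertBy_congr_pv
  intro a ha b hb
  rcases lt_trichotomy (k1 a) (k1 b) with hlt | heq | hgt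
  · simp [hlt, not_lt.mpr hlt.le]
  · have h2 := h a ha b hb heq
    simp [heq, h2]
  · simp [not_lt.mpr hgt.le, hgt]

-- the dict-building loop of A is collections.Counter of the lowered alphabetic characters
theorem dict_loop_eq_counter_pv (word : String) :
    word.toList.foldl aStep PySem.Dict.empty
    = PySem.Dict.counter ((word.toList.filter PySem.Chars.isalpha).map PySem.Chars.lowerChar) := by
  have hstep : aStep = fun d w =>
      if PySem.Chars.isalpha w = true then
        (if d.contains (PySem.Chars.lowerChar w) = true
          then d.insert (PySem.Chars.lowerChar w) (d.getD (PySem.Chars.lowerChar w) 0 + 1)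
          else d.insert (PySem.Chars.lowerChar w) 1)
      else d := rfl
  rw [hstep]
  have h1 := PySem.List.foldl_if_eq_foldl_filter (p := PySem.Chars.isalpha)
    (f := fun (d : PySem.Dict Char Int) w => if d.contains (PySem.Chars.lowerChar w) = true
        then d.insert (PySem.Chars.lowerChar w) (d.getD (PySem.Chars.lowerChar w) 0 + 1)
        else d.insert (PySem.Chars.lowerChar w) 1)
    (l := word.toList) (init := PySem.Dict.empty)
  rw [h1]
  rw [← PySem.Dict.foldl_insert_getD_add_one_eq_counter, List.foldl_map]
  apply PySem.List.foldl_congr_mem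
  intro acc x _
  by_cases hc : acc.contains (PySem.Chars.lowerChar x) = true
  · simp [hc]
  · simp only [Bool.not_eq_true] at hc
    simp [hc, PySem.Dict.getD_of_not_contains acc 0 hc]

theorem count_flatMap_replicate_pv {α : Type} [DecidableEq α] (n : α → Nat) :
    ∀ (ks : List α), ks.Nodup → ∀ v,
      (ks.flatMap (fun k => List.replicate (n k) k)).count v = if v ∈ ks then n v else 0 := by
  intro ks
  induction ks with
  | nil => simp
  | cons k t ih =>
    intro hnd v
    simp only [List.flatMap_cons, List.count_append, List.nodup_cons] at *
    rw [ih hnd.2 v, List.count_replicate]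
    by_cases hv : v = k
    · subst hv
      simp [hnd.1]
    · simp [hv, Ne.symm hv]

-- expanding each distinct letter by its multiplicity rebuilds the multiset of letters
theorem flatMap_replicate_perm_pv (ls : List Char) :
    ((PySem.List.sorted (PySem.Set.ofList ls) (fun x => x) false).flatMap
      (fun k => List.replicate (ls.count k) k)).Perm ls := by
  have hperm := PySem.List.sorted_perm (PySem.Set.ofList ls) (fun x => x) false
  have hnd : (PySem.List.sorted (PySem.Set.ofList ls) (fun x => x) false).Nodup :=
    hperm.symm.nodup (PySem.Set.nodup_ofList ls)
  rw [List.perm_iff_count]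
  intro v
  rw [count_flatMap_replicate_pv (fun k => ls.count k) _ hnd v]
  by_cases hv : v ∈ ls
  · simp [PySem.List.mem_sorted, PySem.Set.mem_ofList, hv]
  · simp [PySem.List.mem_sorted, PySem.Set.mem_ofList, hv, List.count_eq_zero.mpr hv]

-- blocks of equal letters listed in increasing key order are weakly increasing
theorem pairwise_le_flatMap_replicate_pv (n : Char → Nat) :
    ∀ (ks : List Char), ks.Pairwise (· < ·) →
      (ks.flatMap (fun k => List.replicate (n k) k)).Pairwise (· ≤ ·) := by
  intro ks
  induction ks with
  | nil => simp
  | cons k t ih =>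
    intro hp
    rw [List.pairwise_cons] at hp
    simp only [List.flatMap_cons]
    rw [List.pairwise_append]
    refine ⟨?_, ih hp.2, ?_⟩
    · rw [List.pairwise_replicate]
      right; exact le_refl k
    · intro a ha b hb
      rw [List.eq_of_mem_replicate ha]
      rcases List.mem_flatMap.mp hb with ⟨k', hk', hb'⟩
      rw [List.eq_of_mem_replicate hb']
      exact (hp.1 k' hk').le

-- ===== VERDICT (by name: the statement is the Claim_ definition above) =====
theorem get_anagram_signature_spec : Claim_equal_get_anagram_signature := by
  intro word _
  unfold Spec_get_anagram_signature get_anagram_signature get_anagram_signature_alt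
  set ls := (word.toList.filter PySem.Chars.isalpha).map PySem.Chars.lowerChar with hls
  rw [dict_loop_eq_counter_pv word, ← hls]
  show String.ofList (List.foldl (fun out p => out ++ PySem.List.pyRepeat [p.1] p.2) []
      (PySem.List.sorted2 (PySem.Dict.counter ls).items (fun p => p.1) (fun p => p.2) false))
    = String.ofList (PySem.List.sorted ls (fun c => c) false)
  rw [PySem.Dict.items_counter]
  -- sorting the (key, count) pairs as tuples = sorting them by key
  rw [sorted2_eq_sorted_fst_pv _ _ _ (by
    rintro a ha b hb h1
    rcases List.mem_map.mp ha with ⟨ka, _, rfl⟩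
    rcases List.mem_map.mp hb with ⟨kb, _, rfl⟩
    simp only at h1 ⊢
    rw [h1])]
  -- sorting the pairs by key = pairing up the sorted distinct keys
  rw [PySem.List.sorted_eq_of_perm_of_pairwise_lt _
      ((PySem.List.sorted (PySem.Set.ofList ls) (fun x => x) false).map
        (fun k => (k, (ls.count k : Int)))) _
      ((PySem.List.sorted_perm (PySem.Set.ofList ls) (fun x => x) false).map _)
      (List.pairwise_map.mpr (PySem.List.sorted_ofList_pairwise_lt ls))]
  rw [PySem.List.foldl_append_eq_flatMap, List.nil_append, List.flatMap_map]
  simp only [PySem.List.pyRepeat_singleton, Int.toNat_natCast]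
  -- B: sorting the whole letter list = those very blocks of equal letters
  rw [PySem.List.sorted_id_eq_of_perm_of_pairwise ls _
      (flatMap_replicate_perm_pv ls)
      (pairwise_le_flatMap_replicate_pv _ _ (PySem.List.sorted_ofList_pairwise_lt ls))]
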